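-- pv_equiv track=rewrite | github.com/syurskyi/Algorithms_and_Data_Structure | _algorithms_challenges/projecteuler/ProjectEuler-master(2)/ProjectEuler-master/359.py | _build
-- ===== SOURCE A (Python) =====
-- def _build(bound):
--     hotel = []
--     square_set = set([i**2 for i in range(1, 2 * bound)])
--     for n in range(1, bound + 1):
--         found = False
--         for floor in hotel:
--             m = floor[-1]
--             if (n + m) in square_set:
--                 floor.append(n)
--                 found = True
--                 break
--         if not found:
--             hotel.append([n])
--     return hotel
-- ===== SOURCE B (Python) =====
-- def _build(bound):
--     # Dict from each floor's current last value to its floor index; per n only the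
--     # O(sqrt n) candidate squares with n < k*k < 2*n are probed (k0 = least k with
--     # k*k > n is carried across iterations), instead of scanning the floors list.
--     floors = []
--     last_idx = {}
--     k0 = 1
--     for n in range(1, bound + 1):
--         if k0 * k0 <= n:
--             k0 += 1
--         best = None
--         k = k0
--         while k * k < 2 * n:
--             i = last_idx.get(k * k - n)
--             if i is not None and (best is None or i < best):
--                 best = i
--             k += 1
--         if best is None:
--             last_idx[n] = len(floors)
--             floors.append([n])
--         else:
--             del last_idx[floors[best][-1]]
--             last_idx[n] = best
--             floors[best].append(n)
--     return floors
-- ===== Notes on version B (the rewrite author's own statement) =====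
-- stated objective: alternative
-- what changed: Instead of A's per-number linear scan over the floors list guarded by a precomputed set of 2*bound squares, B keeps a dict from each floor's current last value to its floor index and, for each n, probes only the O(sqrt n) candidate squares k*k with n < k*k < 2n (carrying the lower square root across iterations), picking the minimal matching floor index.
import Mathlib
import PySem

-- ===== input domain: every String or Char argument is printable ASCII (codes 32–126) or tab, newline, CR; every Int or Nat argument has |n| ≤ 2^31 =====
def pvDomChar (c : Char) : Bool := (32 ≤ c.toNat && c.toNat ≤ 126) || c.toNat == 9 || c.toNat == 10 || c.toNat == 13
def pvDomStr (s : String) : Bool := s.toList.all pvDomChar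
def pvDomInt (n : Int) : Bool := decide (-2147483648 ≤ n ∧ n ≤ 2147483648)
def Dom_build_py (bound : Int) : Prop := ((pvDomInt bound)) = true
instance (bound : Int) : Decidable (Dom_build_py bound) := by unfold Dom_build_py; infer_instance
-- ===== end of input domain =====

-- B replaces A's per-number scan over the floors list by a dict (last value → floor index)
-- probed at the O(√n) candidate squares strictly between n and 2n; same asymptotics, an
-- alternative algorithm (not measurably faster).

-- ===== PORT A =====

-- floor[-1]: every floor A builds is nonempty, so the default 0 is never the result
def pvLast (f : List Int) : Int := PySem.List.pyGetD f (-1) 0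

-- set([i**2 for i in range(1, 2 * bound)])
def pvSquares (bound : Int) : PySem.Set Int :=
  PySem.Set.ofList ((PySem.List.pyRange 1 (2 * bound) 1).map (fun i => i ^ 2))

-- A's inner 'for floor in hotel: … break': update the first matching floor, none = not found
def pvScanA (sq : PySem.Set Int) (n : Int) : List (List Int) → Option (List (List Int))
  | [] => none
  | floor :: rest =>
    if PySem.Set.contains sq (n + pvLast floor) then some ((floor ++ [n]) :: rest)
    else (pvScanA sq n rest).map (fun h => floor :: h)

def pvStepA (sq : PySem.Set Int) (hotel : List (List Int)) (n : Int) : List (List Int) :=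
  match pvScanA sq n hotel with
  | some h => h
  | none => hotel ++ [[n]]

def build_py (bound : Int) : List (List Int) :=
  (PySem.List.pyRange 1 (bound + 1) 1).foldl (pvStepA (pvSquares bound)) []

-- ===== PORT B =====

-- B's candidate while loop: min dict value over squares k*k with k ≥ k, k*k < 2n
def pvCandMin (d : PySem.Dict Int Int) (n k : Int) (best : Option Int) : Option Int :=
  if h : k * k < 2 * n then
    pvCandMin d n (k + 1)
      (match d.get? (k * k - n) with
       | some i => match best with
         | none => some i
         | some b => if i < b then some i else some b
       | none => best)
  else best
termination_by (2 * n - k).toNat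
decreasing_by
  have hk : k < 2 * n := by nlinarith [mul_self_nonneg (k - 1), mul_self_nonneg k]
  omega

-- one iteration of B's main loop; state = (floors, last_idx, k0); the dict stores only
-- in-range non-negative indices, so the .toNat on them never clamps
def pvStepB (st : List (List Int) × PySem.Dict Int Int × Int) (n : Int) :
    List (List Int) × PySem.Dict Int Int × Int :=
  let floors := st.1
  let d := st.2.1
  let k0 := if st.2.2 * st.2.2 ≤ n then st.2.2 + 1 else st.2.2
  match pvCandMin d n k0 none with
  | none => (floors ++ [[n]], d.insert n (floors.length : Int), k0)
  | some b =>
    let f := floors.getD b.toNat []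
    (floors.set b.toNat (f ++ [n]), (d.erase (pvLast f)).insert n b, k0)

def build_py_alt (bound : Int) : List (List Int) :=
  ((PySem.List.pyRange 1 (bound + 1) 1).foldl pvStepB ([], PySem.Dict.empty, 1)).1

-- ===== PRECONDITION & SPEC =====
def Spec_build_py (bound : Int) (out : List (List Int)) : Prop := out = build_py_alt bound
instance (bound : Int) (out : List (List Int)) : Decidable (Spec_build_py bound out) := by unfold Spec_build_py; infer_instance

-- ===== CLAIM (what is proved, stated in full; the proofs are below) =====
def Claim_equal_build_py : Prop := ∀ (bound : Int), Dom_build_py bound → Spec_build_py bound (build_py bound)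

-- ===== LEMMAS AND PROOFS =====

-- first index of m in a list of Ints (the dict models exactly this)
def pvIdx? (m : Int) : List Int → Option Nat
  | [] => none
  | x :: xs => if x = m then some 0 else (pvIdx? m xs).map Nat.succ

lemma pvIdx?_none (m : Int) : ∀ (l : List Int),
    pvIdx? m l = none ↔ ∀ i (_ : i < l.length), l[i] ≠ m := by
  intro l
  induction l with
  | nil => simp [pvIdx?]
  | cons x xs ih =>
    by_cases hx : x = m
    · simp only [pvIdx?, if_pos hx]
      constructor
      · intro h; exact absurd h (by simp)
      · intro h; exact absurd hx (h 0 (by simp))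
    · simp only [pvIdx?, if_neg hx, Option.map_eq_none_iff]
      rw [ih]
      constructor
      · intro h i hi
        cases i with
        | zero => simpa using hx
        | succ i => simpa using h i (by simpa using hi)
      · intro h i hi
        simpa using h (i + 1) (by simpa using hi)

lemma pvIdx?_some (m : Int) : ∀ (l : List Int) (j : Nat),
    pvIdx? m l = some j ↔
      (∃ _ : j < l.length, l[j] = m) ∧ ∀ i (_ : i < l.length), i < j → l[i] ≠ m := by
  intro l
  induction l with
  | nil => simp [pvIdx?]
  | cons x xs ih =>
    intro j
    by_cases hx : x = m
    · simp only [pvIdx?, if_pos hx]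
      constructor
      · intro h
        have hj : j = 0 := by simpa using h.symm
        subst hj
        exact ⟨⟨by simp, by simpa using hx⟩, by omega⟩
      · rintro ⟨⟨hj, hjm⟩, hmin⟩
        cases j with
        | zero => rfl
        | succ j => exact absurd hx (hmin 0 (by simp) (by omega))
    · simp only [pvIdx?, if_neg hx]
      constructor
      · intro h
        obtain ⟨j', hj', rfl⟩ : ∃ j', pvIdx? m xs = some j' ∧ j = j' + 1 := by
          cases hidx : pvIdx? m xs with
          | none => simp [hidx] at h
          | some j' => exact ⟨j', rfl, by simpa [hidx] using h.symm⟩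
        obtain ⟨⟨hlt, hval⟩, hmin⟩ := (ih j').mp hj'
        refine ⟨⟨by simpa using hlt, by simpa using hval⟩, ?_⟩
        intro i hi hij
        cases i with
        | zero => simpa using hx
        | succ i => simpa using hmin i (by simpa using hi) (by omega)
      · rintro ⟨⟨hj, hjm⟩, hmin⟩
        cases j with
        | zero => exact absurd (by simpa using hjm) hx
        | succ j =>
          have : pvIdx? m xs = some j := by
            rw [ih j]
            refine ⟨⟨by simpa using hj, by simpa using hjm⟩, ?_⟩
            intro i hi hij
            simpa using hmin (i + 1) (by simpa using hi) (by omega)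
          simp [this]

lemma pvGet?_erase (d : PySem.Dict Int Int) (x m : Int) :
    (d.erase x).get? m = if m = x then none else d.get? m := by
  obtain ⟨items⟩ := d
  show ((PySem.Dict.mk (items.filter (fun p => !p.1 == x))).get? m) = _
  by_cases hmx : m = x
  · subst hmx
    rw [if_pos rfl]
    simp only [PySem.Dict.get?, Option.map_eq_none_iff]
    rw [List.find?_eq_none]
    intro p hp
    have := List.of_mem_filter hp
    simp only [Bool.not_eq_eq_eq_not, Bool.not_true, beq_eq_false_iff_ne] at this
    simpa using this
  · simp only [if_neg hmx, PySem.Dict.get?]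
    congr 1
    induction items with
    | nil => rfl
    | cons p ps ih =>
      by_cases hp : p.1 = x
      · have h1 : (p.1 == x) = true := by simpa using hp
        have h2 : (p.1 == m) = false := by
          simp only [beq_eq_false_iff_ne]; exact fun h => hmx (hp ▸ h).symm
        simp [h1, List.find?, h2, ih]
      · have h1 : (p.1 == x) = false := by simpa using hp
        simp only [List.filter_cons, h1, Bool.not_false, if_true]
        cases hpm : (p.1 == m) with
        | true => simp [List.find?, hpm]
        | false => simp [List.find?, hpm, ih]

-- membership in A's square set, for values in the reachable range
lemma pvMem_squares (bound s : Int) (hs : 1 ≤ s) (hsb : s ≤ 2 * bound - 1) :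
    PySem.Set.contains (pvSquares bound) s = true ↔ ∃ k : Int, 1 ≤ k ∧ k * k = s := by
  unfold pvSquares
  rw [PySem.Set.contains_iff, PySem.Set.mem_ofList, List.mem_map]
  constructor
  · rintro ⟨i, hi, rfl⟩
    rw [PySem.List.mem_pyRange_one] at hi
    exact ⟨i, hi.1, by ring⟩
  · rintro ⟨k, hk1, hkk⟩
    refine ⟨k, ?_, by rw [← hkk]; ring⟩
    rw [PySem.List.mem_pyRange_one]
    constructor
    · exact hk1
    · nlinarith

lemma pvScanA_eq_none (sq : PySem.Set Int) (n : Int) : ∀ (h : List (List Int)),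
    (∀ j (_ : j < h.length), PySem.Set.contains sq (n + pvLast h[j]) = false) →
    pvScanA sq n h = none := by
  intro h
  induction h with
  | nil => intro _; rfl
  | cons floor rest ih =>
    intro hall
    have h0 : PySem.Set.contains sq (n + pvLast floor) = false := hall 0 (by simp)
    simp only [pvScanA, h0, Bool.false_eq_true, if_false, Option.map_eq_none_iff]
    exact ih (fun j hj => by simpa using hall (j + 1) (by simpa using hj))

lemma pvScanA_eq_some (sq : PySem.Set Int) (n : Int) : ∀ (h : List (List Int)) (j : Nat)
    (hj : j < h.length),
    (∀ i (_ : i < h.length), i < j → PySem.Set.contains sq (n + pvLast h[i]) = false) →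
    PySem.Set.contains sq (n + pvLast h[j]) = true →
    pvScanA sq n h = some (h.set j (h[j] ++ [n])) := by
  intro h
  induction h with
  | nil => intro j hj; simp at hj
  | cons floor rest ih =>
    intro j hj hmin hyes
    cases j with
    | zero =>
      simp only [List.getElem_cons_zero] at hyes
      simp only [pvScanA, hyes, if_true]
      rfl
    | succ j =>
      have h0 : PySem.Set.contains sq (n + pvLast floor) = false :=
        hmin 0 (by simp) (by omega)
      simp only [pvScanA, h0, Bool.false_eq_true, if_false]
      rw [ih j (by simpa using hj)
        (fun i hi hij => by simpa using hmin (i + 1) (by simpa using hi) (by omega))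
        (by simpa using hyes)]
      simp

-- candidate relation for pvCandMin
def pvCand (d : PySem.Dict Int Int) (n klo i : Int) : Prop :=
  ∃ k : Int, klo ≤ k ∧ k * k < 2 * n ∧ d.get? (k * k - n) = some i

lemma pvCand_empty (d : PySem.Dict Int Int) (n k : Int) (hk : 1 ≤ k)
    (hge : ¬ k * k < 2 * n) : ∀ i, ¬ pvCand d n k i := by
  rintro i ⟨k', h1, h2, _⟩
  nlinarith

lemma pvCand_weaken (d : PySem.Dict Int Int) (n k : Int) {i : Int} :
    pvCand d n (k + 1) i → pvCand d n k i := by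
  rintro ⟨k', h1, h2, h3⟩; exact ⟨k', by omega, h2, h3⟩

lemma pvCandMin_none (d : PySem.Dict Int Int) (n : Int) : ∀ (N : Nat) (k : Int)
    (best : Option Int), (2 * n - k).toNat = N → 1 ≤ k →
    (pvCandMin d n k best = none ↔ best = none ∧ ∀ i, ¬ pvCand d n k i) := by
  intro N
  induction N with
  | zero =>
    intro k best hN hk
    have hge : ¬ k * k < 2 * n := by
      intro hlt
      have : k < 2 * n := by nlinarith
      omega
    rw [pvCandMin, dif_neg hge]
    exact ⟨fun h => ⟨h, pvCand_empty d n k hk hge⟩, fun h => h.1⟩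
  | succ N ihN =>
    intro k best hN hk
    rw [pvCandMin]
    by_cases hlt : k * k < 2 * n
    · rw [dif_pos hlt]
      have hk2 : k < 2 * n := by nlinarith
      cases hget : d.get? (k * k - n) with
      | none =>
        rw [ihN (k + 1) best (by omega) (by omega)]
        have hcand : ∀ i, pvCand d n k i ↔ pvCand d n (k + 1) i := by
          intro i
          constructor
          · rintro ⟨k', h1, h2, h3⟩
            rcases eq_or_lt_of_le h1 with rfl | hgt
            · rw [hget] at h3; cases h3
            · exact ⟨k', by omega, h2, h3⟩
          · exact pvCand_weaken d n k
        exact and_congr Iff.rfl (forall_congr' fun i => not_congr (hcand i).symm)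
      | some i0 =>
        have hc0 : pvCand d n k i0 := ⟨k, le_refl k, hlt, hget⟩
        cases best with
        | none =>
          rw [ihN (k + 1) (some i0) (by omega) (by omega)]
          constructor
          · rintro ⟨hh, _⟩; cases hh
          · rintro ⟨_, hall⟩; exact absurd hc0 (hall i0)
        | some b =>
          simp only [hget]
          constructor
          · intro h
            rcases (ihN (k + 1) _ (by omega) (by omega)).mp h with ⟨hnone, _⟩
            split at hnone <;> cases hnone
          · rintro ⟨h, _⟩; cases h
    · rw [dif_neg hlt]
      exact ⟨fun h => ⟨h, pvCand_empty d n k hk hlt⟩, fun h => h.1⟩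

lemma pvCandMin_some (d : PySem.Dict Int Int) (n : Int) : ∀ (N : Nat) (k : Int)
    (best : Option Int) (i : Int), (2 * n - k).toNat = N → 1 ≤ k →
    pvCandMin d n k best = some i →
    (pvCand d n k i ∨ best = some i) ∧ (∀ j, pvCand d n k j → i ≤ j) ∧
      (∀ b, best = some b → i ≤ b) := by
  intro N
  induction N with
  | zero =>
    intro k best i hN hk h
    have hge : ¬ k * k < 2 * n := by
      intro hlt
      have : k < 2 * n := by nlinarith
      omega
    rw [pvCandMin, dif_neg hge] at h
    refine ⟨Or.inr h, fun j hj => absurd hj (pvCand_empty d n k hk hge j), ?_⟩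
    rintro b rfl
    exact le_of_eq (Option.some_injective _ h).symm
  | succ N ihN =>
    intro k best i hN hk h
    rw [pvCandMin] at h
    by_cases hlt : k * k < 2 * n
    · rw [dif_pos hlt] at h
      have hk2 : k < 2 * n := by nlinarith
      cases hget : d.get? (k * k - n) with
      | none =>
        rw [hget] at h
        obtain ⟨hor, hmin, hbest⟩ := ihN (k + 1) best i (by omega) (by omega) h
        refine ⟨?_, ?_, hbest⟩
        · rcases hor with hc | hb
          · exact Or.inl (pvCand_weaken d n k hc)
          · exact Or.inr hb
        · rintro j ⟨k', h1, h2, h3⟩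
          rcases eq_or_lt_of_le h1 with rfl | hgt
          · rw [hget] at h3; cases h3
          · exact hmin j ⟨k', by omega, h2, h3⟩
      | some i0 =>
        rw [hget] at h
        have hc0 : pvCand d n k i0 := ⟨k, le_refl k, hlt, hget⟩
        have hN' : (2 * n - (k + 1)).toNat = N := by omega
        have hk1' : (1 : Int) ≤ k + 1 := by omega
        have hkey : ∀ (bv : Int),
            bv ≤ i0 → (∀ b0, best = some b0 → bv ≤ b0) →
            (bv = i0 ∨ ∃ b0, best = some b0 ∧ bv = b0) →
            pvCandMin d n (k + 1) (some bv) = some i →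
            (pvCand d n k i ∨ best = some i) ∧ (∀ j, pvCand d n k j → i ≤ j) ∧
              (∀ b0, best = some b0 → i ≤ b0) := by
          intro bv hvi0 hble hbv hrec
          obtain ⟨hor, hmin, hbest⟩ := ihN (k + 1) (some bv) i hN' hk1' hrec
          have hibv : i ≤ bv := hbest bv rfl
          refine ⟨?_, ?_, ?_⟩
          · rcases hor with hc | hb
            · exact Or.inl (pvCand_weaken d n k hc)
            · have hieq : i = bv := (Option.some_injective _ hb).symm
              rcases hbv with h1 | ⟨b0, hb0, h2⟩
              · exact Or.inl (by rw [hieq, h1]; exact hc0)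
              · exact Or.inr (by rw [hb0, hieq, h2])
          · rintro j ⟨k', h1, h2, h3⟩
            rcases eq_or_lt_of_le h1 with rfl | hgt
            · rw [hget] at h3
              have : j = i0 := Option.some_injective _ h3.symm
              rw [this]
              exact le_trans hibv hvi0
            · exact hmin j ⟨k', by omega, h2, h3⟩
          · intro b0 hb0
            exact le_trans hibv (hble b0 hb0)
        cases hb : best with
        | none =>
          subst hb
          have h' : pvCandMin d n (k + 1) (some i0) = some i := h
          exact hkey i0 le_rfl (by rintro b0 h0; cases h0) (Or.inl rfl) h'
        | some b =>
          subst hb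
          by_cases hib : i0 < b
          · have h' : pvCandMin d n (k + 1) (some i0) = some i := by
              rw [← h]; congr 1; simp [hib]
            exact hkey i0 le_rfl
              (by rintro b0 h0; cases h0; omega) (Or.inl rfl) h'
          · have h' : pvCandMin d n (k + 1) (some b) = some i := by
              rw [← h]; congr 1; simp [hib]
            exact hkey b (by omega)
              (by rintro b0 h0; cases h0; rfl)
              (Or.inr ⟨b, rfl, rfl⟩) h'
    · rw [dif_neg hlt] at h
      refine ⟨Or.inr h, fun j hj => absurd hj (pvCand_empty d n k hk hlt j), ?_⟩
      rintro b rfl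
      exact le_of_eq (Option.some_injective _ h).symm

-- the loop invariant tying A's hotel to B's (floors, dict, k0) after processing 1..t
def pvInv (h : List (List Int)) (d : PySem.Dict Int Int) (k0 t : Int) : Prop :=
  (∀ j (_ : j < h.length), 1 ≤ pvLast h[j] ∧ pvLast h[j] ≤ t) ∧
  (∀ i1 i2 (_ : i1 < h.length) (_ : i2 < h.length),
      pvLast h[i1] = pvLast h[i2] → i1 = i2) ∧
  (∀ m : Int, d.get? m = (pvIdx? m (h.map pvLast)).map (fun j => (j : Int))) ∧
  (1 ≤ k0 ∧ (k0 - 1) * (k0 - 1) ≤ t ∧ t < k0 * k0)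

lemma pvLast_append (f : List Int) (x : Int) : pvLast (f ++ [x]) = x :=
  PySem.List.pyGetD_neg_one_append_singleton f x 0

lemma pvLast_singleton (x : Int) : pvLast [x] = x := pvLast_append [] x

lemma pvStepB_reduce (h : List (List Int)) (d : PySem.Dict Int Int) (k0 n : Int) :
    pvStepB (h, d, k0) n =
      match pvCandMin d n (if k0 * k0 ≤ n then k0 + 1 else k0) none with
      | none => (h ++ [[n]], d.insert n (h.length : Int),
          if k0 * k0 ≤ n then k0 + 1 else k0)
      | some b => (h.set b.toNat ((h.getD b.toNat []) ++ [n]),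
          (d.erase (pvLast (h.getD b.toNat []))).insert n b,
          if k0 * k0 ≤ n then k0 + 1 else k0) := rfl

lemma pvStep_eq (bound t : Int) (h : List (List Int)) (d : PySem.Dict Int Int) (k0 : Int)
    (hInv : pvInv h d k0 t) (ht : 0 ≤ t) (hb : t + 1 ≤ bound) :
    (pvStepB (h, d, k0) (t + 1)).1 = pvStepA (pvSquares bound) h (t + 1) ∧
    pvInv (pvStepB (h, d, k0) (t + 1)).1 (pvStepB (h, d, k0) (t + 1)).2.1
      (pvStepB (h, d, k0) (t + 1)).2.2 (t + 1) := by
  obtain ⟨hbnd, hinj, hdict, hk01, hk02, hk03⟩ := hInv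
  set n := t + 1 with hn
  set k0' := if k0 * k0 ≤ n then k0 + 1 else k0 with hk0'
  have hk0'1 : 1 ≤ k0' := by rw [hk0']; split <;> omega
  have hk0'low : (k0' - 1) * (k0' - 1) ≤ n := by
    rw [hk0']
    split
    · next hc =>
      have he : k0 + 1 - 1 = k0 := by ring
      rw [he]; exact hc
    · next hc => omega
  have hk0'high : n < k0' * k0' := by
    rw [hk0']
    split
    · next hc => nlinarith
    · next hc => omega
  have hlen : (h.map pvLast).length = h.length := by simp
  have hbridge : ∀ i : Int, pvCand d n k0' i ↔
      ∃ j : Nat, ∃ _ : j < h.length, i = (j : Int) ∧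
        PySem.Set.contains (pvSquares bound) (n + pvLast h[j]) = true := by
    intro i
    constructor
    · rintro ⟨k, hk, hklt, hget⟩
      rw [hdict] at hget
      cases hidx : pvIdx? (k * k - n) (h.map pvLast) with
      | none => rw [hidx] at hget; cases hget
      | some j =>
        rw [hidx] at hget
        obtain ⟨⟨hj, hval⟩, -⟩ := (pvIdx?_some _ _ _).mp hidx
        rw [List.getElem_map] at hval
        have hj' : j < h.length := hlen ▸ hj
        have hieq : i = (j : Int) := (Option.some_injective _ hget).symm
        have hb1 := (hbnd j hj').1
        have hb2 := (hbnd j hj').2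
        have h1k : 1 ≤ k := le_trans hk0'1 hk
        refine ⟨j, hj', hieq, ?_⟩
        rw [pvMem_squares bound _ (by omega) (by omega)]
        exact ⟨k, h1k, by omega⟩
    · rintro ⟨j, hj, rfl, hcont⟩
      have hb1 := (hbnd j hj).1
      have hb2 := (hbnd j hj).2
      rw [pvMem_squares bound _ (by omega) (by omega)] at hcont
      obtain ⟨k, hk1, hkk⟩ := hcont
      have hkge : k0' ≤ k := by
        by_contra hlt
        rw [not_le] at hlt
        have : k * k ≤ (k0' - 1) * (k0' - 1) := by nlinarith
        omega
      refine ⟨k, hkge, by omega, ?_⟩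
      rw [hdict]
      have hix : pvIdx? (k * k - n) (h.map pvLast) = some j := by
        rw [pvIdx?_some]
        refine ⟨⟨hlen ▸ hj, ?_⟩, ?_⟩
        · rw [List.getElem_map]; omega
        · intro i hi hij
          rw [List.getElem_map]
          intro heq
          have hi' : i < h.length := hlen ▸ hi
          have : pvLast h[i] = pvLast h[j] := by omega
          exact absurd (hinj i j hi' hj this) (by omega)
      rw [hix]
      rfl
  rw [pvStepB_reduce]
  cases hcm : pvCandMin d n k0' none with
  | none =>
    obtain ⟨-, hnc⟩ := (pvCandMin_none d n _ k0' none rfl hk0'1).mp hcm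
    have hfail : ∀ j (_ : j < h.length),
        PySem.Set.contains (pvSquares bound) (n + pvLast h[j]) = false := by
      intro j hj
      cases hc : PySem.Set.contains (pvSquares bound) (n + pvLast h[j]) with
      | false => rfl
      | true => exact absurd ((hbridge (j : Int)).mpr ⟨j, hj, rfl, hc⟩) (hnc (j : Int))
    have hscan : pvScanA (pvSquares bound) n h = none := pvScanA_eq_none _ _ h hfail
    have hmap : (h ++ [[n]]).map pvLast = h.map pvLast ++ [n] := by
      simp [pvLast_singleton]
    constructor
    · show (h ++ [[n]] : List (List Int)) = pvStepA (pvSquares bound) h n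
      unfold pvStepA
      rw [hscan]
    · refine ⟨?_, ?_, ?_, hk0'1, hk0'low, hk0'high⟩
      · intro j hj
        simp only [List.length_append, List.length_cons, List.length_nil] at hj
        by_cases hjl : j < h.length
        · rw [List.getElem_append_left hjl]
          have := hbnd j hjl
          omega
        · have hje : j = h.length := by omega
          subst hje
          rw [List.getElem_append_right (le_refl h.length)]
          simp [pvLast_singleton]
          omega
      · intro i1 i2 h1 h2 heq
        simp only [List.length_append, List.length_cons, List.length_nil] at h1 h2
        by_cases hc1 : i1 < h.length <;> by_cases hc2 : i2 < h.length
        · rw [List.getElem_append_left hc1, List.getElem_append_left hc2] at heq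
          exact hinj i1 i2 hc1 hc2 heq
        · have hi2 : i2 = h.length := by omega
          subst hi2
          rw [List.getElem_append_left hc1,
              List.getElem_append_right (le_refl h.length)] at heq
          simp [pvLast_singleton] at heq
          have := (hbnd i1 hc1).2
          omega
        · have hi1 : i1 = h.length := by omega
          subst hi1
          rw [List.getElem_append_right (le_refl h.length),
              List.getElem_append_left hc2] at heq
          simp [pvLast_singleton] at heq
          have := (hbnd i2 hc2).2
          omega
        · omega
      · intro m
        rw [PySem.Dict.get?_insert, hmap]
        by_cases hm : m = n
        · rw [if_pos hm]
          subst hm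
          have hix : pvIdx? n (h.map pvLast ++ [n]) = some (h.map pvLast).length := by
            rw [pvIdx?_some]
            refine ⟨⟨by simp, ?_⟩, ?_⟩
            · rw [List.getElem_append_right (le_refl (h.map pvLast).length)]
              simp
            · intro i hi hilt
              rw [List.getElem_append_left hilt, List.getElem_map]
              have := (hbnd i (hlen ▸ hilt)).2
              omega
          rw [hix, hlen]
          rfl
        · rw [if_neg hm, hdict]
          have hix : pvIdx? m (h.map pvLast ++ [n]) = pvIdx? m (h.map pvLast) := by
            cases hold : pvIdx? m (h.map pvLast) with
            | some j =>
              obtain ⟨⟨hj, hv⟩, hmin⟩ := (pvIdx?_some _ _ _).mp hold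
              rw [pvIdx?_some]
              have hjl : j < (h.map pvLast ++ [n]).length := by
                simp only [List.length_append, List.length_cons, List.length_nil]
                omega
              refine ⟨⟨hjl, ?_⟩, ?_⟩
              · rw [List.getElem_append_left hj]
                exact hv
              · intro i hi hij
                have hil : i < (h.map pvLast).length := by omega
                rw [List.getElem_append_left hil]
                exact hmin i hil hij
            | none =>
              rw [pvIdx?_none] at hold ⊢
              intro i hi
              simp only [List.length_append, List.length_cons, List.length_nil] at hi
              by_cases hil : i < (h.map pvLast).length
              · rw [List.getElem_append_left hil]
                exact hold i hil
              · have hie : i = (h.map pvLast).length := by omega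
                subst hie
                rw [List.getElem_append_right (le_refl (h.map pvLast).length)]
                simpa using Ne.symm hm
          rw [hix]
  | some b =>
    obtain ⟨hor, hminb, -⟩ := pvCandMin_some d n _ k0' none b rfl hk0'1 hcm
    have hcb : pvCand d n k0' b := by
      rcases hor with hc | hc
      · exact hc
      · cases hc
    obtain ⟨j0, hj0, hbj0, hcontj0⟩ := (hbridge b).mp hcb
    have hfirst : ∀ i (_ : i < h.length), i < j0 →
        PySem.Set.contains (pvSquares bound) (n + pvLast h[i]) = false := by
      intro i hi hij
      cases hc : PySem.Set.contains (pvSquares bound) (n + pvLast h[i]) with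
      | false => rfl
      | true =>
        have := hminb (i : Int) ((hbridge (i : Int)).mpr ⟨i, hi, rfl, hc⟩)
        omega
    have hscan : pvScanA (pvSquares bound) n h = some (h.set j0 (h[j0] ++ [n])) :=
      pvScanA_eq_some _ _ h j0 hj0 hfirst hcontj0
    have hbt : b.toNat = j0 := by rw [hbj0]; exact Int.toNat_natCast j0
    have hgd : h.getD b.toNat [] = h[j0] := by
      rw [hbt]
      exact List.getD_eq_getElem h [] hj0
    have hmap : (h.set b.toNat ((h.getD b.toNat []) ++ [n])).map pvLast
        = (h.map pvLast).set j0 n := by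
      rw [List.map_set, pvLast_append, hbt]
    have hlen' : ∀ {j : Nat}, j < ((h.map pvLast).set j0 n).length ↔ j < h.length := by
      intro j
      rw [List.length_set, hlen]
    have hgetm : ∀ (j : Nat) (hj : j < (h.set b.toNat ((h.getD b.toNat []) ++ [n])).length),
        pvLast (h.set b.toNat ((h.getD b.toNat []) ++ [n]))[j]
          = ((h.map pvLast).set j0 n)[j]'(by simpa using hj) := by
      intro j hj
      have h1 : ((h.set b.toNat ((h.getD b.toNat []) ++ [n])).map pvLast)[j]'(by simpa using hj)
          = pvLast (h.set b.toNat ((h.getD b.toNat []) ++ [n]))[j] := List.getElem_map _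
      have h2 : ((h.set b.toNat ((h.getD b.toNat []) ++ [n])).map pvLast)[j]'(by simpa using hj)
          = ((h.map pvLast).set j0 n)[j]'(by simpa using hj) := List.getElem_of_eq hmap _
      exact h1.symm.trans h2
    constructor
    · show (h.set b.toNat ((h.getD b.toNat []) ++ [n]) : List (List Int))
        = pvStepA (pvSquares bound) h n
      unfold pvStepA
      rw [hscan, hgd, hbt]
    · refine ⟨?_, ?_, ?_, hk0'1, hk0'low, hk0'high⟩
      · intro j hj
        rw [List.length_set] at hj
        have hj' : j < ((h.map pvLast).set j0 n).length := by rw [List.length_set, hlen]; exact hj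
        rw [hgetm j (by rw [List.length_set]; exact hj), List.getElem_set]
        split
        · omega
        · have := hbnd j hj
          rw [List.getElem_map]
          omega
      · intro i1 i2 h1 h2 heq
        rw [List.length_set] at h1 h2
        rw [hgetm i1 (by rw [List.length_set]; exact h1),
            hgetm i2 (by rw [List.length_set]; exact h2),
            List.getElem_set, List.getElem_set] at heq
        by_cases hc1 : j0 = i1 <;> by_cases hc2 : j0 = i2
        · omega
        · rw [if_pos hc1, if_neg hc2, List.getElem_map] at heq
          have := (hbnd i2 h2).2
          omega
        · rw [if_neg hc1, if_pos hc2, List.getElem_map] at heq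
          have := (hbnd i1 h1).2
          omega
        · rw [if_neg hc1, if_neg hc2, List.getElem_map, List.getElem_map] at heq
          exact hinj i1 i2 h1 h2 heq
      · intro m
        have hold : pvLast (h.getD b.toNat []) = (h.map pvLast)[j0]'(hlen ▸ hj0) := by
          rw [hgd, List.getElem_map]
        have holdv : pvLast (h.getD b.toNat []) ≤ t := by
          rw [hgd]
          exact (hbnd j0 hj0).2
        rw [PySem.Dict.get?_insert, pvGet?_erase, hmap]
        by_cases hm : m = n
        · rw [if_pos hm]
          subst hm
          have hix : pvIdx? n ((h.map pvLast).set j0 n) = some j0 := by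
            rw [pvIdx?_some]
            refine ⟨⟨by rw [List.length_set, hlen]; exact hj0, ?_⟩, ?_⟩
            · rw [List.getElem_set, if_pos rfl]
            · intro i hi hij
              rw [List.getElem_set, if_neg (by omega)]
              have := (hbnd i (hlen'.mp hi)).2
              rw [List.getElem_map]
              omega
          rw [hix, hbj0]
          rfl
        · rw [if_neg hm]
          by_cases hmo : m = pvLast (h.getD b.toNat [])
          · rw [if_pos hmo]
            have hix : pvIdx? m ((h.map pvLast).set j0 n) = none := by
              rw [pvIdx?_none]
              intro i hi
              rw [List.getElem_set]
              split
              · omega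
              · intro heq
                have hi' : i < h.length := hlen'.mp hi
                have hlj : (h.map pvLast)[i]'(hlen ▸ hi') = pvLast h[i] := List.getElem_map _
                have hlj0 : pvLast h[i] = pvLast h[j0] := by
                  rw [← hlj, heq, hmo, hold, List.getElem_map]
                exact absurd (hinj i j0 hi' hj0 hlj0) (by omega)
            rw [hix]
            rfl
          · rw [if_neg hmo, hdict]
            have hix : pvIdx? m ((h.map pvLast).set j0 n) = pvIdx? m (h.map pvLast) := by
              cases holdix : pvIdx? m (h.map pvLast) with
              | some j =>
                obtain ⟨⟨hj, hv⟩, hmin⟩ := (pvIdx?_some _ _ _).mp holdix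
                have hjj0 : j ≠ j0 := by
                  intro hje
                  subst hje
                  exact hmo (by rw [← hv, hold])
                rw [pvIdx?_some]
                refine ⟨⟨by rw [List.length_set]; exact hj, ?_⟩, ?_⟩
                · rw [List.getElem_set, if_neg (by omega)]
                  exact hv
                · intro i hi hij
                  rw [List.getElem_set]
                  split
                  · intro heq
                    exact hm heq.symm
                  · exact hmin i (by simpa using hi) hij
              | none =>
                rw [pvIdx?_none] at holdix ⊢
                intro i hi
                rw [List.getElem_set]
                split
                · intro heq
                  exact hm heq.symm
                · exact holdix i (by simpa using hi)
            rw [hix]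

lemma pvFold_eq (bound : Int) : ∀ (N : Nat) (t : Int) (h : List (List Int))
    (d : PySem.Dict Int Int) (k0 : Int), (bound - t).toNat = N → 0 ≤ t →
    pvInv h d k0 t →
    ((PySem.List.pyRange (t + 1) (bound + 1) 1).foldl pvStepB (h, d, k0)).1
      = (PySem.List.pyRange (t + 1) (bound + 1) 1).foldl (pvStepA (pvSquares bound)) h := by
  intro N
  induction N with
  | zero =>
    intro t h d k0 hN ht hInv
    rw [PySem.List.pyRange_one_eq_nil (by omega)]
    rfl
  | succ N ihN =>
    intro t h d k0 hN ht hInv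
    by_cases hbt : bound ≤ t
    · rw [PySem.List.pyRange_one_eq_nil (by omega)]
      rfl
    · rw [PySem.List.pyRange_one_cons (by omega : t + 1 < bound + 1)]
      simp only [List.foldl_cons]
      obtain ⟨heq, hInv'⟩ := pvStep_eq bound t h d k0 hInv ht (by omega)
      have hsplit : pvStepB (h, d, k0) (t + 1)
          = ((pvStepB (h, d, k0) (t + 1)).1, (pvStepB (h, d, k0) (t + 1)).2.1,
             (pvStepB (h, d, k0) (t + 1)).2.2) := rfl
      rw [hsplit]
      have := ihN (t + 1) (pvStepB (h, d, k0) (t + 1)).1 (pvStepB (h, d, k0) (t + 1)).2.1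
        (pvStepB (h, d, k0) (t + 1)).2.2 (by omega) (by omega) hInv'
      rw [this, heq]

-- ===== VERDICT (by name: the statement is the Claim_ definition above) =====
theorem build_py_spec : Claim_equal_build_py := by
  intro bound _
  unfold Spec_build_py
  by_cases hb : 0 ≤ bound
  · have h0 : pvInv ([] : List (List Int)) (PySem.Dict.empty) 1 0 := by
      refine ⟨by simp, by simp, ?_, by norm_num⟩
      intro m; simp [PySem.Dict.get?_empty, pvIdx?]
    have := pvFold_eq bound (bound.toNat) 0 [] PySem.Dict.empty 1 (by omega) le_rfl h0
    unfold build_py build_py_alt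
    simpa using this.symm
  · have hnil : PySem.List.pyRange 1 (bound + 1) 1 = [] :=
      PySem.List.pyRange_one_eq_nil (by omega)
    unfold build_py build_py_alt
    rw [hnil]; rfl
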